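-- pv_equiv track=rewrite | github.com/shaharsh624/Information-Security | Information Security Lab/PRACTICE/myrsa.py | RSA
-- ===== SOURCE A (Python) =====
-- def gcd(a, b):
--     while b != 0:
--         a, b = b, a % b
--     return a
--
-- def mod_inverse(e, phi_of_n):
--     for d in range(3, phi_of_n):
--         if ((d * e) % phi_of_n) == 1:
--             return d
--     raise ValueError("Mod Inverse doesn't exist!")
--
-- def RSA(p, q):
--     n = p * q
--     phi_of_n = (p - 1) * (q - 1)
--
--     for i in range(3, phi_of_n):
--         if gcd(i, phi_of_n) == 1:
--             e = i
--             break
--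
--     d = mod_inverse(e, phi_of_n)
--
--     return n, e, d
-- ===== SOURCE B (Python) =====
-- def _egcd(a, b):
--     # iterative extended Euclid: returns (g, x) with g = gcd(a, b) and x*a === g (mod b)
--     old_r, r = a, b
--     old_x, x = 1, 0
--     while r != 0:
--         qt = old_r // r
--         old_r, r = r, old_r - qt * r
--         old_x, x = x, old_x - qt * x
--     return old_r, old_x
--
-- def RSA(p, q):
--     n = p * q
--     phi_of_n = (p - 1) * (q - 1)
--     for e in range(3, phi_of_n):
--         g, x = _egcd(e, phi_of_n)
--         if g == 1:
--             return n, e, x % phi_of_n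
--     raise ValueError("Mod Inverse doesn't exist!")
-- ===== Notes on version B (the rewrite author's own statement) =====
-- stated objective: faster
-- what changed: The O(phi) linear scan for the modular inverse (and the standalone gcd helper) is replaced by a single pass of the iterative extended Euclidean algorithm, which yields the gcd and the inverse together in O(log phi); Pre_ excludes exactly the inputs on which A raises (phi < 4: e never bound, UnboundLocalError; phi = 5: the inverse of e=3 is 2, below A's scan start of 3, ValueError).
import Mathlib
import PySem

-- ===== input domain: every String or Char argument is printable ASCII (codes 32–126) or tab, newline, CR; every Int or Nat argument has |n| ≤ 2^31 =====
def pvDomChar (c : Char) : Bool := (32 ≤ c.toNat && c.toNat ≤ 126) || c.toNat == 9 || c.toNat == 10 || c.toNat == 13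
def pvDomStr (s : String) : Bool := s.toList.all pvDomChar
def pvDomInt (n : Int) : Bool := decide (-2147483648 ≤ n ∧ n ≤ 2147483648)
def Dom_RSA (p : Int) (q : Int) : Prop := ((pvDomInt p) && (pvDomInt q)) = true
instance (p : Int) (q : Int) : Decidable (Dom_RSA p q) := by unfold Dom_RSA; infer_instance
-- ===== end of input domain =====

-- B replaces A's O(phi) linear scan for the modular inverse by the extended Euclidean
-- algorithm (O(log phi)); equivalence is proved on the inputs where A returns (phi ≥ 4, phi ≠ 5).

-- ===== PORT A =====
-- termination helper for the Euclid loops (cited by decreasing_by)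
theorem pvMod_natAbs_lt (a b : Int) (hb : b ≠ 0) : (PySem.Int.mod a b).natAbs < b.natAbs := by
  rcases lt_or_gt_of_ne hb with h | h
  · have h1 := PySem.Int.mod_neg_bounds a h
    omega
  · have h1 := PySem.Int.mod_nonneg a h
    have h2 := PySem.Int.mod_lt a h
    omega

-- Python helper gcd(a, b): while b != 0: a, b = b, a % b
def pyGcd (a b : Int) : Int :=
  if h : b = 0 then a else pyGcd b (PySem.Int.mod a b)
termination_by b.natAbs
decreasing_by exact pvMod_natAbs_lt a b h

-- Python helper mod_inverse: for d in range(3, phi): if (d*e) % phi == 1: return d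
def modInvScan (e phi : Int) : List Int → Option Int
  | [] => none
  | d :: rest => if PySem.Int.mod (d * e) phi = 1 then some d else modInvScan e phi rest

def modInverseA (e phi : Int) : Option Int :=
  modInvScan e phi (PySem.List.pyRange 3 phi 1)

-- the e-search loop: for i in range(3, phi): if gcd(i, phi) == 1: e = i; break
def eScan (phi : Int) : List Int → Option Int
  | [] => none
  | i :: rest => if pyGcd i phi = 1 then some i else eScan phi rest

-- n = p*q and phi = (p-1)*(q-1) are inlined
def RSA (p : Int) (q : Int) : List Int :=
  match eScan ((p - 1) * (q - 1)) (PySem.List.pyRange 3 ((p - 1) * (q - 1)) 1) with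
  | none => []                                   -- Python: e unbound → UnboundLocalError (outside Pre_)
  | some e =>
    match modInverseA e ((p - 1) * (q - 1)) with
    | none => []                                 -- Python: ValueError (outside Pre_)
    | some d => [p * q, e, d]

-- ===== PORT B =====
-- iterative extended Euclid: returns (g, x) with g = gcd(a, b), x*a ≡ g (mod b)
def egcdLoop (oldr r oldx x : Int) : Int × Int :=
  if h : r = 0 then (oldr, oldx)
  else
    egcdLoop r (oldr - PySem.Int.floordiv oldr r * r) x (oldx - PySem.Int.floordiv oldr r * x)
termination_by r.natAbs
decreasing_by
  have hm : oldr - PySem.Int.floordiv oldr r * r = PySem.Int.mod oldr r := by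
    have := PySem.Int.floordiv_mul_add_mod oldr r
    omega
  rw [hm]
  exact pvMod_natAbs_lt oldr r h

def egcd (a b : Int) : Int × Int := egcdLoop a b 1 0

-- for e in range(3, phi): g, x = egcd(e, phi); if g == 1: return n, e, x % phi
def altScan (n phi : Int) : List Int → List Int
  | [] => []                                     -- Python: ValueError (outside Pre_)
  | e :: rest =>
    let gx := egcd e phi
    if gx.1 = 1 then [n, e, PySem.Int.mod gx.2 phi]
    else altScan n phi rest

def RSA_alt (p : Int) (q : Int) : List Int :=
  altScan (p * q) ((p - 1) * (q - 1)) (PySem.List.pyRange 3 ((p - 1) * (q - 1)) 1)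

-- ===== PRECONDITION & SPEC =====
-- Pre_ excludes exactly the inputs where A raises (UnboundLocalError when phi < 4, ValueError
-- when phi = 5); nothing A returns on is excluded.
def Pre_RSA (p : Int) (q : Int) : Prop :=
  4 ≤ (p - 1) * (q - 1) ∧ (p - 1) * (q - 1) ≠ 5
instance (p : Int) (q : Int) : Decidable (Pre_RSA p q) := by unfold Pre_RSA; infer_instance

def pvWitness_RSA : Int × Int := (3, 11)

def Spec_RSA (p : Int) (q : Int) (out : List Int) : Prop := out = RSA_alt p q
instance (p : Int) (q : Int) (out : List Int) : Decidable (Spec_RSA p q out) := by unfold Spec_RSA; infer_instance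

-- ===== CLAIM (what is proved, stated in full; the proofs are below) =====
def Claim_equal_RSA : Prop := ∀ (p : Int) (q : Int), Dom_RSA p q → Pre_RSA p q → Spec_RSA p q (RSA p q)

-- ===== LEMMAS AND PROOFS =====

theorem pyGcd_eq_aux (n : Nat) : ∀ (a b : Int), b.natAbs ≤ n → 0 < b →
    pyGcd a b = (Int.gcd a b : Int) := by
  induction n with
  | zero => intro a b hn hb; omega
  | succ n ih =>
    intro a b hn hb
    rw [pyGcd, dif_neg hb.ne']
    have hmod : PySem.Int.mod a b = a % b := PySem.Int.mod_eq_emod_of_pos hb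
    by_cases hm : PySem.Int.mod a b = 0
    · rw [hm, pyGcd, dif_pos rfl]
      have hdvd : b ∣ a := (PySem.Int.mod_eq_zero_iff_dvd a b).mp hm
      rw [Int.gcd_eq_natAbs_right_iff_dvd.mpr hdvd]
      exact (Int.natAbs_of_nonneg hb.le).symm
    · have hpos : 0 < PySem.Int.mod a b := lt_of_le_of_ne (PySem.Int.mod_nonneg a hb) (Ne.symm hm)
      have hlt := pvMod_natAbs_lt a b hb.ne'
      rw [ih b (PySem.Int.mod a b) (by omega) hpos, hmod, Int.gcd_comm, Int.gcd_emod]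

theorem pyGcd_eq (a b : Int) (hb : 0 < b) : pyGcd a b = (Int.gcd a b : Int) :=
  pyGcd_eq_aux b.natAbs a b le_rfl hb

theorem egcdLoop_fst_aux (n : Nat) : ∀ (oldr r oldx x : Int), r.natAbs ≤ n → 0 ≤ oldr → 0 ≤ r →
    (egcdLoop oldr r oldx x).1 = (Int.gcd oldr r : Int) := by
  induction n with
  | zero =>
    intro oldr r oldx x hn h1 h2
    have hr : r = 0 := by omega
    rw [egcdLoop, dif_pos hr, hr]
    simp [Int.natAbs_of_nonneg h1]
  | succ n ih =>
    intro oldr r oldx x hn h1 h2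
    by_cases hr : r = 0
    · rw [egcdLoop, dif_pos hr, hr]
      simp [Int.natAbs_of_nonneg h1]
    · rw [egcdLoop, dif_neg hr]
      have hrpos : 0 < r := lt_of_le_of_ne h2 (Ne.symm hr)
      have hm : oldr - PySem.Int.floordiv oldr r * r = PySem.Int.mod oldr r := by
        have := PySem.Int.floordiv_mul_add_mod oldr r
        omega
      have hlt := pvMod_natAbs_lt oldr r hr
      rw [ih r (oldr - PySem.Int.floordiv oldr r * r) x (oldx - PySem.Int.floordiv oldr r * x)
        (by omega) h2 (by rw [hm]; exact PySem.Int.mod_nonneg oldr hrpos)]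
      rw [hm, PySem.Int.mod_eq_emod_of_pos hrpos, Int.gcd_comm r, Int.gcd_emod]

theorem egcdLoop_snd_aux (phi e : Int) (n : Nat) : ∀ (oldr r oldx x : Int), r.natAbs ≤ n →
    oldx * e ≡ oldr [ZMOD phi] → x * e ≡ r [ZMOD phi] →
    (egcdLoop oldr r oldx x).2 * e ≡ (egcdLoop oldr r oldx x).1 [ZMOD phi] := by
  induction n with
  | zero =>
    intro oldr r oldx x hn m1 m2
    have hr : r = 0 := by omega
    rw [egcdLoop, dif_pos hr]
    exact m1
  | succ n ih =>
    intro oldr r oldx x hn m1 m2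
    by_cases hr : r = 0
    · rw [egcdLoop, dif_pos hr]; exact m1
    · rw [egcdLoop, dif_neg hr]
      have hlt := pvMod_natAbs_lt oldr r hr
      have hm : oldr - PySem.Int.floordiv oldr r * r = PySem.Int.mod oldr r := by
        have := PySem.Int.floordiv_mul_add_mod oldr r
        omega
      refine ih r (oldr - PySem.Int.floordiv oldr r * r) x (oldx - PySem.Int.floordiv oldr r * x)
        (by omega) m2 ?_
      have : (oldx - PySem.Int.floordiv oldr r * x) * e
          = oldx * e - PySem.Int.floordiv oldr r * (x * e) := by ring
      rw [this]
      exact Int.ModEq.sub m1 (Int.ModEq.mul_left _ m2)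

-- uniqueness of the inverse in [0, phi)
theorem pvInvUnique (phi e d1 d2 : Int) (hphi : 0 < phi) (hg : Int.gcd e phi = 1)
    (h1 : 0 ≤ d1) (h1' : d1 < phi) (h2 : 0 ≤ d2) (h2' : d2 < phi)
    (m1 : d1 * e ≡ 1 [ZMOD phi]) (m2 : d2 * e ≡ 1 [ZMOD phi]) : d1 = d2 := by
  have hmul : d1 * e ≡ d2 * e [ZMOD phi] := m1.trans m2.symm
  have hcan := Int.ModEq.cancel_right_div_gcd hphi hmul
  rw [Int.gcd_comm phi e, hg, Nat.cast_one, Int.ediv_one] at hcan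
  have := hcan.eq
  rwa [Int.emod_eq_of_lt h1 h1', Int.emod_eq_of_lt h2 h2'] at this

theorem modInvScan_unique (e phi d0 : Int) : ∀ L : List Int,
    (∀ d ∈ L, (PySem.Int.mod (d * e) phi = 1 ↔ d = d0)) →
    modInvScan e phi L = if d0 ∈ L then some d0 else none := by
  intro L
  induction L with
  | nil => intro _; simp [modInvScan]
  | cons d rest ih =>
    intro h
    rw [modInvScan]
    by_cases hp : PySem.Int.mod (d * e) phi = 1
    · have hd : d = d0 := (h d (List.mem_cons_self)).mp hp
      subst hd
      rw [if_pos hp, if_pos List.mem_cons_self]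
    · have hd : d ≠ d0 := fun hdd => hp ((h d List.mem_cons_self).mpr hdd)
      rw [if_neg hp, ih (fun x hx => h x (List.mem_cons_of_mem d hx))]
      simp [List.mem_cons, Ne.symm hd]

theorem altScan_eq (n phi : Int) (hphi : 0 < phi) : ∀ L : List Int, (∀ i ∈ L, 0 ≤ i) →
    altScan n phi L =
      (match eScan phi L with
       | none => []
       | some e => [n, e, PySem.Int.mod (egcd e phi).2 phi]) := by
  intro L
  induction L with
  | nil => intro _; simp [altScan, eScan]
  | cons i rest ih =>
    intro h
    have hi : 0 ≤ i := h i List.mem_cons_self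
    have hcond : (egcd i phi).1 = 1 ↔ pyGcd i phi = 1 := by
      rw [egcd, egcdLoop_fst_aux phi.natAbs i phi 1 0 le_rfl hi hphi.le, pyGcd_eq i phi hphi]
    rw [altScan, eScan]
    by_cases hg : pyGcd i phi = 1
    · rw [if_pos (hcond.mpr hg), if_pos hg]
    · rw [if_neg (fun hc => hg (hcond.mp hc)), if_neg hg,
        ih (fun x hx => h x (List.mem_cons_of_mem i hx))]

theorem eScan_some (phi e : Int) : ∀ L : List Int, eScan phi L = some e →
    e ∈ L ∧ pyGcd e phi = 1 := by
  intro L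
  induction L with
  | nil => intro h; simp [eScan] at h
  | cons i rest ih =>
    intro h
    rw [eScan] at h
    by_cases hg : pyGcd i phi = 1
    · rw [if_pos hg] at h
      obtain rfl : i = e := by injection h
      exact ⟨List.mem_cons_self, hg⟩
    · rw [if_neg hg] at h
      obtain ⟨h1, h2⟩ := ih h
      exact ⟨List.mem_cons_of_mem i h1, h2⟩

theorem eScan_none (phi : Int) : ∀ L : List Int, eScan phi L = none →
    ∀ i ∈ L, pyGcd i phi ≠ 1 := by
  intro L
  induction L with
  | nil => intro _ i hi; simp at hi
  | cons j rest ih =>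
    intro h i hi
    rw [eScan] at h
    by_cases hg : pyGcd j phi = 1
    · rw [if_pos hg] at h; cases h
    · rw [if_neg hg] at h
      rcases List.mem_cons.mp hi with rfl | hin
      · exact hg
      · exact ih h i hin

theorem gcd_four_odd (phi : Int) (h : ¬ (2 : Int) ∣ phi) : Int.gcd 4 phi = 1 := by
  have h2 : Nat.Coprime 2 phi.natAbs := by
    rw [Nat.Prime.coprime_iff_not_dvd Nat.prime_two]
    intro hd
    exact h (by omega)
  have h4 : Nat.Coprime (2 ^ 2) phi.natAbs := Nat.Coprime.pow_left 2 h2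
  simpa [Int.gcd] using h4

-- ===== VERDICT (by name: the statement is the Claim_ definition above) =====
theorem RSA_spec : Claim_equal_RSA := by
  unfold Claim_equal_RSA
  intro p q _hdom hpre
  obtain ⟨hphi4, hne5⟩ := hpre
  unfold Spec_RSA RSA RSA_alt
  set phi := (p - 1) * (q - 1) with hphidef
  have hpos : 0 < phi := by omega
  set L := PySem.List.pyRange 3 phi 1 with hL
  clear_value phi
  -- the e-search succeeds
  cases h : eScan phi L with
  | none =>
    exfalso
    have hmem : phi - 1 ∈ L := by
      rw [hL, PySem.List.mem_pyRange_one]; omega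
    have hg : pyGcd (phi - 1) phi = 1 := by
      rw [pyGcd_eq _ _ hpos]
      have : Int.gcd (phi - 1) phi = 1 := by
        simpa using Int.gcd_add_mul_left_left phi (-1) 1
      rw [this]; rfl
    exact eScan_none phi L h (phi - 1) hmem hg
  | some e0 =>
    obtain ⟨he0mem, he0g⟩ := eScan_some phi e0 L h
    have he0range : 3 ≤ e0 ∧ e0 < phi := by
      rw [hL, PySem.List.mem_pyRange_one] at he0mem; exact he0mem
    have hge : Int.gcd e0 phi = 1 := by
      rw [pyGcd_eq e0 phi hpos] at he0g; exact_mod_cast he0g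
    -- extended-Euclid facts
    have hfst : (egcd e0 phi).1 = 1 := by
      rw [egcd, egcdLoop_fst_aux phi.natAbs e0 phi 1 0 le_rfl (by omega) hpos.le, hge]; rfl
    have hsnd : (egcd e0 phi).2 * e0 ≡ 1 [ZMOD phi] := by
      have := egcdLoop_snd_aux phi e0 phi.natAbs e0 phi 1 0 le_rfl
        (by rw [one_mul]) (by rw [zero_mul]; exact Int.modulus_modEq_zero.symm)
      rw [← egcd] at this
      rwa [hfst] at this
    set d0 := PySem.Int.mod (egcd e0 phi).2 phi with hd0def
    have hd0lo : 0 ≤ d0 := PySem.Int.mod_nonneg _ hpos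
    have hd0hi : d0 < phi := PySem.Int.mod_lt _ hpos
    have hd0m : d0 * e0 ≡ 1 [ZMOD phi] := by
      have hmm : d0 ≡ (egcd e0 phi).2 [ZMOD phi] := by
        rw [hd0def, PySem.Int.mod_eq_emod_of_pos hpos]
        exact Int.mod_modEq _ _
      exact (hmm.mul_right e0).trans hsnd
    -- d0 ≥ 3 : here phi ≥ 4 and phi ≠ 5 are essential
    have hd3 : 3 ≤ d0 := by
      by_contra hlt
      replace hlt : d0 < 3 := by omega
      interval_cases d0
      · -- d0 = 0 : 0 ≡ 1 mod phi
        have : phi ∣ 1 - 0 := Int.ModEq.dvd (by simpa using hd0m)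
        have := Int.le_of_dvd (by norm_num) this
        omega
      · -- d0 = 1 : e0 ≡ 1 mod phi
        have hdvd : phi ∣ 1 - e0 := Int.ModEq.dvd (by simpa using hd0m)
        have hdvd' : phi ∣ e0 - 1 := by
          have := hdvd.neg_right
          simpa using this
        have := Int.le_of_dvd (by omega) hdvd'
        omega
      · -- d0 = 2 : 2*e0 ≡ 1 mod phi forces phi = 2*e0 - 1
        have hdvd : phi ∣ 1 - 2 * e0 := Int.ModEq.dvd hd0m
        have hdvd' : phi ∣ 2 * e0 - 1 := by
          have := hdvd.neg_right
          simpa using this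
        obtain ⟨k, hk⟩ := hdvd'
        have hk1 : k = 1 := by
          rcases lt_trichotomy k 1 with hlt1 | heq | hgt1
          · have hk0 : k ≤ 0 := by omega
            nlinarith
          · exact heq
          · nlinarith
        have hphival : phi = 2 * e0 - 1 := by rw [hk1, mul_one] at hk; omega
        have hodd : ¬ (2 : Int) ∣ phi := by rintro ⟨c, hc⟩; omega
        by_cases hg3 : pyGcd 3 phi = 1
        · -- first candidate 3 is coprime, so e0 = 3 and phi = 5
          have hLc : L = 3 :: PySem.List.pyRange 4 phi 1 := by
            rw [hL, PySem.List.pyRange_one_cons (by omega)]; norm_num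
          rw [hLc, eScan, if_pos hg3] at h
          have : e0 = 3 := by injection h with h'; omega
          omega
        · -- 3 ∣ phi, phi odd, so 4 is coprime and first: e0 = 4 and phi = 7, contradiction
          have h3dvd : (3 : Int) ∣ phi := by
            have hdl : ((Int.gcd 3 phi : Int)) ∣ (3 : Int) := Int.gcd_dvd_left 3 phi
            have hdl' : Int.gcd 3 phi ∣ 3 := by exact_mod_cast hdl
            have hle := Nat.le_of_dvd (by norm_num) hdl'
            have hne1 : Int.gcd 3 phi ≠ 1 := by
              intro hh
              exact hg3 (by rw [pyGcd_eq 3 phi hpos, hh]; rfl)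
            have h3 : Int.gcd 3 phi = 3 := by interval_cases h : Int.gcd 3 phi <;> omega
            have := Int.gcd_dvd_right (3 : Int) phi
            rwa [h3] at this
          have hphi9 : 9 ≤ phi := by
            obtain ⟨m, hm⟩ := h3dvd
            omega
          have hg4 : pyGcd 4 phi = 1 := by
            rw [pyGcd_eq 4 phi hpos, gcd_four_odd phi hodd]; rfl
          have hLc : L = 3 :: 4 :: PySem.List.pyRange 5 phi 1 := by
            rw [hL, PySem.List.pyRange_one_cons (show (3:Int) < phi by omega)]
            rw [PySem.List.pyRange_one_cons (show (3:Int) + 1 < phi by omega)]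
            norm_num
          rw [hLc, eScan, if_neg hg3, eScan, if_pos hg4] at h
          have : e0 = 4 := by injection h with h'; omega
          omega
    -- A's inner scan finds exactly d0
    have hchar : ∀ d ∈ L, (PySem.Int.mod (d * e0) phi = 1 ↔ d = d0) := by
      intro d hd
      rw [hL, PySem.List.mem_pyRange_one] at hd
      constructor
      · intro hp
        have hmod : d * e0 % phi = 1 % phi := by
          rw [PySem.Int.mod_eq_emod_of_pos hpos] at hp
          rw [hp, Int.emod_eq_of_lt (by norm_num) (by omega)]
        exact pvInvUnique phi e0 d d0 hpos hge (by omega) (by omega) hd0lo hd0hi hmod hd0m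
      · intro hdd
        rw [hdd, PySem.Int.mod_eq_emod_of_pos hpos]
        have := hd0m.eq
        rwa [Int.emod_eq_of_lt (by norm_num) (by omega : (1:Int) < phi)] at this
    have hA : modInverseA e0 phi = some d0 := by
      rw [modInverseA, ← hL, modInvScan_unique e0 phi d0 L hchar, if_pos]
      rw [hL, PySem.List.mem_pyRange_one]
      omega
    -- assemble
    have hnn : ∀ i ∈ L, 0 ≤ i := fun i hi => by
      rw [hL, PySem.List.mem_pyRange_one] at hi; omega
    rw [altScan_eq (p * q) phi hpos L hnn, h]
    simp [hA, ← hd0def]
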